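-- pv_equiv track=rewrite | github.com/KimHeeSu1203/algorithm | programmers/17681.py | solution
-- ===== SOURCE A (Python) =====
-- def makeBinary(n,arr):
--     binaryArr = []
--     for i in range(len(arr)):
--         binaryN = []
--         num = arr[i]
--         for _ in range(n):
--             binaryN.append(num%2)
--             num = num // 2
--         binaryN.reverse()
--         binaryArr.append(binaryN)
--     return binaryArr
--
-- def solution(n, arr1, arr2):
--     binary1 = makeBinary(n,arr1)
--     binary2 = makeBinary(n,arr2)
--     binary = [["#" for _ in range(n)] for _ in range(n)]
--     for i in range(n):
--         for j in range(n):
--             if (binary1[i][j]+binary2[i][j])==0: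
--                 binary[i][j] = " "
--         binary[i] = "".join(binary[i])
--     return binary
-- ===== SOURCE B (Python) =====
-- def solution(n, arr1, arr2):
--     # Integer bitwise OR of whole rows + binary string formatting: no per-digit
--     # loops and no digit matrices at all.
--     if n <= 0:
--         return []
--     mask = (1 << n) - 1
--     table = str.maketrans('10', '# ')
--     return [format((a | b) & mask, 'b').zfill(n).translate(table)
--             for a, b in zip(arr1[:n], arr2[:n])]
-- ===== Notes on version B (the rewrite author's own statement) =====
-- stated objective: faster
-- what changed: B replaces A's per-digit decomposition (two n-by-n digit matrices built by repeated %2//2 and a cell-by-cell merge pass) with whole-row integer bitwise OR plus masking and binary string formatting (format(v,'b').zfill(n).translate): the Python-level per-digit loops disappear into C-level bigint and string operations.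
import Mathlib
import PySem

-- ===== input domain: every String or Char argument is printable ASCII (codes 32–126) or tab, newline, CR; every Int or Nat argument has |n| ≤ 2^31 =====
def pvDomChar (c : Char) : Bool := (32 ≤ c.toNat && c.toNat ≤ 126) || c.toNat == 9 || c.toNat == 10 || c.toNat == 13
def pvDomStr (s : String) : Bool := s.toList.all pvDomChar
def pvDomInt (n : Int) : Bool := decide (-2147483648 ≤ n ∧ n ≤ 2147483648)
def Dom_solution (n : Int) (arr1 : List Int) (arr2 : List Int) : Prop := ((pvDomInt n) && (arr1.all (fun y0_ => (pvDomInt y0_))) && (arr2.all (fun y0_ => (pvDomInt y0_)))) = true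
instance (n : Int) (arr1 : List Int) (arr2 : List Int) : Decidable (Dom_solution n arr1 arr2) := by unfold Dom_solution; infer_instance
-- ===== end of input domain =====

-- B replaces A's per-digit decomposition (two n×n digit matrices and a cell-by-cell merge)
-- by whole-row integer bitwise OR plus masking and binary string formatting (measured faster).

-- ===== PORT A =====
-- inner loop of makeBinary: n times append num%2 then num //= 2
def pvDigitsA (k : Nat) (num : Int) (acc : List Int) : List Int :=
  match k with
  | 0 => acc
  | k' + 1 => pvDigitsA k' (PySem.Int.floordiv num 2) (acc ++ [PySem.Int.mod num 2])

-- 'for i in range(len(arr)): num = arr[i]; …' visits exactly the elements of arr in order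
def pvMakeBinary (n : Int) (arr : List Int) : List (List Int) :=
  arr.map (fun num => (pvDigitsA n.toNat num []).reverse)

def solution (n : Int) (arr1 : List Int) (arr2 : List Int) : List String :=
  let binary1 := pvMakeBinary n arr1
  let binary2 := pvMakeBinary n arr2
  -- row i: start from n '#' cells, overwrite with ' ' where both digits are 0, then join
  (PySem.List.pyRange 0 n 1).map (fun i =>
    String.ofList ((PySem.List.pyRange 0 n 1).map (fun j =>
      if PySem.List.pyGetD (PySem.List.pyGetD binary1 i []) j 0
           + PySem.List.pyGetD (PySem.List.pyGetD binary2 i []) j 0 = 0 then ' ' else '#')))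

-- ===== PORT B =====
-- str.maketrans('10', '# ') + translate: '1' ↦ '#', '0' ↦ ' ', anything else unchanged
def pvTrans (c : Char) : Char := if c = '1' then '#' else if c = '0' then ' ' else c

def solution_alt (n : Int) (arr1 : List Int) (arr2 : List Int) : List String :=
  if n ≤ 0 then []
  else
    -- mask = (1 << n) - 1  (n > 0 here, so the shift count is n.toNat)
    let mask : Int := (1 <<< n.toNat) - 1
    (List.zip (PySem.List.slice arr1 none (some n)) (PySem.List.slice arr2 none (some n))).map
      (fun p => String.ofList
        ((PySem.Chars.zfill
            (PySem.Int.toBinChars (PySem.Int.band (PySem.Int.bor p.1 p.2) mask)) n).map pvTrans))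

-- ===== PRECONDITION & SPEC =====
-- Pre_ excludes exactly the inputs where A raises IndexError: 0 < n but one array is shorter than n.
def Pre_solution (n : Int) (arr1 : List Int) (arr2 : List Int) : Prop :=
  0 < n → (n ≤ (arr1.length : Int) ∧ n ≤ (arr2.length : Int))
instance (n : Int) (arr1 : List Int) (arr2 : List Int) : Decidable (Pre_solution n arr1 arr2) := by
  unfold Pre_solution; infer_instance

def pvWitness_solution : Int × List Int × List Int := (2, [1, 2], [3, 0])

def Spec_solution (n : Int) (arr1 : List Int) (arr2 : List Int) (out : List String) : Prop := out = solution_alt n arr1 arr2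
instance (n : Int) (arr1 : List Int) (arr2 : List Int) (out : List String) : Decidable (Spec_solution n arr1 arr2 out) := by unfold Spec_solution; infer_instance

-- ===== CLAIM (what is proved, stated in full; the proofs are below) =====
def Claim_equal_solution : Prop := ∀ (n : Int) (arr1 : List Int) (arr2 : List Int), Dom_solution n arr1 arr2 → Pre_solution n arr1 arr2 → Spec_solution n arr1 arr2 (solution n arr1 arr2)

-- ===== LEMMAS AND PROOFS =====

-- the pure digit stream [num%2, (num//2)%2, …] (least significant first)
def pvDig (k : Nat) (num : Int) : List Int :=
  match k with
  | 0 => []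
  | k' + 1 => PySem.Int.mod num 2 :: pvDig k' (PySem.Int.floordiv num 2)

def pvCell (x y : Int) : Char := if x + y = 0 then ' ' else '#'

theorem pvDig_length (k : Nat) (num : Int) : (pvDig k num).length = k := by
  induction k generalizing num with
  | zero => rfl
  | succ k' ih => simp [pvDig, ih]

theorem pvDigitsA_eq (k : Nat) (num : Int) (acc : List Int) :
    pvDigitsA k num acc = acc ++ pvDig k num := by
  induction k generalizing num acc with
  | zero => simp [pvDigitsA, pvDig]
  | succ k' ih => simp [pvDigitsA, pvDig, ih]

-- A's j-indexed row over the reversed digit lists is the reversed zip of the digit streams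
theorem pvRow_eq (n : Int) (a b : Int) :
    ((PySem.List.pyRange 0 n 1).map (fun j =>
        if PySem.List.pyGetD (pvDig n.toNat a).reverse j 0
             + PySem.List.pyGetD (pvDig n.toNat b).reverse j 0 = 0 then ' ' else '#'))
      = (List.zipWith pvCell (pvDig n.toNat a) (pvDig n.toNat b)).reverse := by
  apply List.ext_getElem
  · simp [PySem.List.length_pyRange_one, pvDig_length]
  · intro j h1 h2
    have hj : j < n.toNat := by
      simpa [PySem.List.length_pyRange_one] using h1
    rw [List.getElem_map, PySem.List.getElem_pyRange_one]
    have hz : (0 : Int) + (j : Int) = ((j : Nat) : Int) := by omega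
    rw [hz, PySem.List.pyGetD_natCast, PySem.List.pyGetD_natCast]
    have hja : j < (pvDig n.toNat a).reverse.length := by simp [pvDig_length, hj]
    have hjb : j < (pvDig n.toNat b).reverse.length := by simp [pvDig_length, hj]
    rw [List.getD_eq_getElem _ _ hja, List.getD_eq_getElem _ _ hjb,
        List.getElem_reverse, List.getElem_reverse, List.getElem_reverse, List.getElem_zipWith]
    simp [pvCell, pvDig_length]

-- ---- bitwise bridge: PySem band/bor are Mathlib's Int.land/Int.lor ----

theorem pvAnd_div_two (x y : Nat) : (x &&& y) / 2 = (x / 2) &&& (y / 2) := by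
  apply Nat.eq_of_testBit_eq
  intro i
  simp [Nat.testBit_div_two, Nat.testBit_and]

theorem pvLdiff_div_two (x y : Nat) : (Nat.ldiff x y) / 2 = Nat.ldiff (x / 2) (y / 2) := by
  apply Nat.eq_of_testBit_eq
  intro i
  simp [Nat.testBit_div_two, Nat.testBit_ldiff]

theorem pvAnd_mod_two (x y : Nat) :
    (x &&& y) % 2 = if x % 2 = 1 ∧ y % 2 = 1 then 1 else 0 := by
  have h := Nat.testBit_and x y 0
  simp only [Nat.testBit_zero] at h
  rcases Nat.mod_two_eq_zero_or_one (x &&& y) with h1 | h1 <;>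
    rcases Nat.mod_two_eq_zero_or_one x with h2 | h2 <;>
    rcases Nat.mod_two_eq_zero_or_one y with h3 | h3 <;>
    simp_all

theorem pvLdiff_mod_two (x y : Nat) :
    (Nat.ldiff x y) % 2 = if x % 2 = 1 ∧ y % 2 = 0 then 1 else 0 := by
  have h := Nat.testBit_ldiff x y 0
  simp only [Nat.testBit_zero] at h
  rcases Nat.mod_two_eq_zero_or_one (Nat.ldiff x y) with h1 | h1 <;>
    rcases Nat.mod_two_eq_zero_or_one x with h2 | h2 <;>
    rcases Nat.mod_two_eq_zero_or_one y with h3 | h3 <;>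
    simp_all

-- w - (w & m) is the and-not (Python computes negative & / | through it)
theorem pvSubAnd (w : Nat) : ∀ m : Nat, w - (w &&& m) = Nat.ldiff w m := by
  induction w using Nat.strong_induction_on with
  | _ w ih =>
    intro m
    rcases Nat.eq_zero_or_pos w with hw | hw
    · subst hw
      have : Nat.ldiff 0 m = 0 := by
        apply Nat.eq_of_testBit_eq; intro i; simp [Nat.testBit_ldiff]
      simp [this]
    · have hrec := ih (w / 2) (by omega) (m / 2)
      have h1 := pvAnd_div_two w m
      have h2 := pvLdiff_div_two w m
      have h3 := pvAnd_mod_two w m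
      have h4 := pvLdiff_mod_two w m
      have h5 : w / 2 &&& m / 2 ≤ w / 2 := Nat.and_le_left
      have h6 : w &&& m ≤ w := Nat.and_le_left
      set A2 := w &&& m with hA2
      set A' := w / 2 &&& m / 2 with hA'
      set L := Nat.ldiff w m with hL
      set L' := Nat.ldiff (w / 2) (m / 2) with hL'
      rcases Nat.mod_two_eq_zero_or_one w with hwm | hwm <;>
        rcases Nat.mod_two_eq_zero_or_one m with hmm | hmm <;>
        rw [hwm, hmm] at h3 h4 <;> norm_num at h3 h4 <;> omega

theorem pvBor_eq (a b : Int) : PySem.Int.bor a b = Int.lor a b := by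
  cases a with
  | ofNat m =>
    cases b with
    | ofNat n => simp [PySem.Int.bor, Int.lor]
    | negSucc n =>
      simp only [PySem.Int.bor, Int.lor]
      norm_num [Int.negSucc_eq]
      rw [if_neg (show ¬((n : Int) ≤ -1) by omega), pvSubAnd]
      ring
  | negSucc m =>
    cases b with
    | ofNat n =>
      simp only [PySem.Int.bor, Int.lor]
      norm_num [Int.negSucc_eq]
      rw [if_neg (show ¬((m : Int) ≤ -1) by omega), pvSubAnd]
      ring
    | negSucc n =>
      simp only [PySem.Int.bor, Int.lor]
      norm_num [Int.negSucc_eq]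
      rw [if_neg (show ¬((m : Int) ≤ -1) by omega), if_neg (show ¬((n : Int) ≤ -1) by omega)]
      ring
theorem pvBand_eq (a b : Int) : PySem.Int.band a b = Int.land a b := by
  cases a with
  | ofNat m =>
    cases b with
    | ofNat n => simp [PySem.Int.band, Int.land]
    | negSucc n =>
      simp only [PySem.Int.band, Int.land]
      norm_num [Int.negSucc_eq]
      rw [if_neg (show ¬((n : Int) ≤ -1) by omega), pvSubAnd]
  | negSucc m =>
    cases b with
    | ofNat n =>
      simp only [PySem.Int.band, Int.land]
      norm_num [Int.negSucc_eq]
      rw [if_neg (show ¬((m : Int) ≤ -1) by omega), pvSubAnd]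
    | negSucc n =>
      simp only [PySem.Int.band, Int.land]
      norm_num [Int.negSucc_eq]
      rw [if_neg (show ¬((m : Int) ≤ -1) by omega), if_neg (show ¬((n : Int) ≤ -1) by omega)]
      ring

-- masking with 2^k-1 yields a Nat < 2^k whose low bits are the argument's bits
theorem pvLandMask (y : Int) (k : Nat) :
    ∃ w : Nat, Int.land y ((2 : Int) ^ k - 1) = (w : Int) ∧ w < 2 ^ k ∧
      ∀ j, j < k → w.testBit j = y.testBit j := by
  have hcast : ((2 : Int) ^ k - 1) = Int.ofNat (2 ^ k - 1) := by
    have : (1 : Nat) ≤ 2 ^ k := Nat.one_le_two_pow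
    simp only [Int.ofNat_eq_natCast]
    push_cast [this]
    ring
  rw [hcast]
  cases y with
  | ofNat m =>
    refine ⟨m &&& (2 ^ k - 1), rfl, ?_, ?_⟩
    · rw [Nat.and_two_pow_sub_one_eq_mod]
      exact Nat.mod_lt _ (Nat.two_pow_pos k)
    · intro j hj
      simp [Nat.testBit_and, Nat.testBit_two_pow_sub_one, hj, Int.testBit]
  | negSucc m =>
    refine ⟨Nat.ldiff (2 ^ k - 1) m, rfl, ?_, ?_⟩
    · have hle : Nat.ldiff (2 ^ k - 1) m ≤ 2 ^ k - 1 := by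
        apply Nat.le_of_testBit
        intro i hi
        rw [Nat.testBit_ldiff] at hi
        exact (Bool.and_eq_true _ _ |>.mp hi).1
      have : (0 : Nat) < 2 ^ k := Nat.two_pow_pos k
      omega
    · intro j hj
      simp [Nat.testBit_ldiff, Nat.testBit_two_pow_sub_one, hj, Int.testBit]

-- a % 2 reads bit 0, a // 2 shifts the bits down (Python floor semantics)
theorem pvMod2 (a : Int) : PySem.Int.mod a 2 = if a.testBit 0 then 1 else 0 := by
  rw [PySem.Int.mod_eq_emod_of_pos (by norm_num)]
  cases a with
  | ofNat m =>
    rcases Nat.mod_two_eq_zero_or_one m with h | h <;>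
      simp [Int.testBit, Nat.testBit_zero, h] <;> omega
  | negSucc m =>
    rcases Nat.mod_two_eq_zero_or_one m with h | h <;>
      simp [Int.testBit, Nat.testBit_zero, h, Int.negSucc_eq] <;> omega

theorem pvDiv2 (a : Int) (j : Nat) :
    (PySem.Int.floordiv a 2).testBit j = a.testBit (j + 1) := by
  rw [PySem.Int.floordiv_eq_ediv_of_pos (by norm_num)]
  cases a with
  | ofNat m =>
    have h : (Int.ofNat m) / 2 = Int.ofNat (m / 2) := by
      simp only [Int.ofNat_eq_natCast]; omega
    rw [h]
    simp [Int.testBit, Nat.testBit_div_two]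
  | negSucc m =>
    have h : (Int.negSucc m) / 2 = Int.negSucc (m / 2) := by
      rw [Int.negSucc_eq, Int.negSucc_eq]; omega
    rw [h]
    simp [Int.testBit, Nat.testBit_div_two]

theorem pvDigElem (k : Nat) (a : Int) (j : Nat) (h : j < k)
    (h' : j < (pvDig k a).length) :
    (pvDig k a)[j] = if a.testBit j then (1 : Int) else 0 := by
  induction k generalizing a j with
  | zero => omega
  | succ k' ih =>
    cases j with
    | zero => simpa [pvDig] using pvMod2 a
    | succ j' =>
      have h2 : j' < (pvDig k' (PySem.Int.floordiv a 2)).length := by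
        simp [pvDig_length]; omega
      simp only [pvDig, List.getElem_cons_succ]
      rw [ih _ _ (by omega) h2, pvDiv2]

-- ---- the zero-padded binary rendering ----

def pvPadBin (k : Nat) (w : Nat) : List Char :=
  match k with
  | 0 => []
  | k' + 1 => pvPadBin k' (w / 2) ++ [Nat.digitChar (w % 2)]

theorem pvPadBin_length (k w : Nat) : (pvPadBin k w).length = k := by
  induction k generalizing w with
  | zero => rfl
  | succ k' ih => simp [pvPadBin, ih]

theorem pvPadBin_getElem (k w j : Nat) (h : j < k) (h' : j < (pvPadBin k w).length) :
    (pvPadBin k w)[j] = if w.testBit (k - 1 - j) then '1' else '0' := by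
  induction k generalizing w j with
  | zero => omega
  | succ k' ih =>
    rcases Nat.lt_or_ge j k' with hj | hj
    · have hlen : j < (pvPadBin k' (w / 2)).length := by simp [pvPadBin_length]; omega
      simp only [pvPadBin]
      rw [List.getElem_append_left hlen, ih _ _ hj hlen]
      have e : k' + 1 - 1 - j = (k' - 1 - j) + 1 := by omega
      rw [e, ← Nat.testBit_div_two]
    · have hjk : j = k' := by omega
      have hlen : (pvPadBin k' (w / 2)).length = k' := pvPadBin_length _ _
      simp only [pvPadBin]
      rw [List.getElem_append_right (by omega)]
      have e1 : k' + 1 - 1 - j = 0 := by omega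
      have e2 : j - (pvPadBin k' (w / 2)).length = 0 := by omega
      simp only [e1, e2, List.getElem_cons_zero]
      rw [Nat.testBit_zero]
      rcases Nat.mod_two_eq_zero_or_one w with h2 | h2 <;> simp [h2, Nat.digitChar]

theorem pvPadBin_zero (k : Nat) : pvPadBin k 0 = List.replicate k '0' := by
  induction k with
  | zero => rfl
  | succ k' ih =>
    simp only [pvPadBin]
    rw [Nat.zero_div, ih, List.replicate_succ']
    simp [Nat.digitChar]

-- format(w, 'b') padded with zeros to width k is the fixed-width binary rendering
theorem pvToDigits_pad (k : Nat) : ∀ w : Nat, 0 < k → w < 2 ^ k →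
    List.replicate (k - (Nat.toDigits 2 w).length) '0' ++ Nat.toDigits 2 w = pvPadBin k w := by
  induction k with
  | zero => omega
  | succ k' ih =>
    intro w _ hw
    rcases Nat.lt_or_ge w 2 with h2 | h2
    · rw [Nat.toDigits_of_lt_base h2]
      have hd : w / 2 = 0 := by omega
      have hm : w % 2 = w := by omega
      simp only [pvPadBin]
      rw [hd, pvPadBin_zero, hm]
      simp
    · rcases Nat.eq_zero_or_pos k' with hk | hk
      · subst hk; simp at hw; omega
      · rw [Nat.toDigits_of_base_le (by omega) h2]
        have hlt : w / 2 < 2 ^ k' := by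
          have : w < 2 ^ (k' + 1) := hw
          rw [pow_succ] at this
          omega
        have := ih (w / 2) hk hlt
        simp only [pvPadBin]
        rw [← this]
        have hlen : (k' + 1) - ((Nat.toDigits 2 (w / 2)).length + 1)
            = k' - (Nat.toDigits 2 (w / 2)).length := by omega
        simp only [List.length_append, List.length_singleton, hlen]
        simp

-- zfill on a nonempty all-digit string is plain left padding with '0'
theorem pvZfill_digits (cs : List Char) (k : Nat) (hne : cs ≠ [])
    (hdig : ∀ c ∈ cs, c.isDigit = true) :
    PySem.Chars.zfill cs (k : Int) = List.replicate (k - cs.length) '0' ++ cs := by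
  unfold PySem.Chars.zfill
  split_ifs with h
  · have : k ≤ cs.length := by exact_mod_cast h
    have : k - cs.length = 0 := by omega
    simp [this]
  · cases cs with
    | nil => exact absurd rfl hne
    | cons c rest =>
      have hc : c.isDigit = true := hdig c (by simp)
      have hns : ¬ (c = '+' ∨ c = '-') := by
        rintro (rfl | rfl) <;> simp at hc
      simp only [hns, if_false]
      have : (k : Int).toNat = k := by omega
      rw [this]

-- the whole row: A's merged digit row is B's masked-OR binary rendering
theorem pvRowMain (k : Nat) (a b : Int) (hk : 0 < k) :
    (List.zipWith pvCell (pvDig k a) (pvDig k b)).reverse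
      = (PySem.Chars.zfill
          (PySem.Int.toBinChars (PySem.Int.band (PySem.Int.bor a b) (((1 <<< k : Nat) : Int) - 1)))
          (k : Int)).map pvTrans := by
  have hmask : (((1 <<< k : Nat) : Int) - 1) = (2 : Int) ^ k - 1 := by
    have : (1 <<< k : Nat) = 2 ^ k := by simp [Nat.shiftLeft_eq]
    rw [this]; push_cast; ring
  rw [pvBor_eq, pvBand_eq, hmask]
  obtain ⟨w, hw, hlt, hbits⟩ := pvLandMask (Int.lor a b) k
  rw [hw]
  have hbin : PySem.Int.toBinChars (w : Int) = Nat.toDigits 2 w := by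
    unfold PySem.Int.toBinChars
    have h1 : ¬ ((w : Int) < 0) := by omega
    simp [h1]
  rw [hbin]
  rw [pvZfill_digits _ k (by have := Nat.length_toDigits_pos (b := 2) (n := w); intro hcon; simp [hcon] at this)
        (fun c hc => Nat.isDigit_of_mem_toDigits (by omega) (by omega) hc)]
  rw [pvToDigits_pad k w hk hlt]
  apply List.ext_getElem
  · simp [pvDig_length, pvPadBin_length]
  · intro j h1 h2
    have hj : j < k := by simpa [pvDig_length] using h1
    have hi : k - 1 - j < k := by omega
    have hza : k - 1 - j < (pvDig k a).length := by simp [pvDig_length]; omega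
    have hzb : k - 1 - j < (pvDig k b).length := by simp [pvDig_length]; omega
    have hz : k - 1 - j < (List.zipWith pvCell (pvDig k a) (pvDig k b)).length := by
      simp [pvDig_length]; omega
    rw [List.getElem_reverse, List.getElem_map]
    have hlen2 : j < (pvPadBin k w).length := by simp [pvPadBin_length]; omega
    rw [pvPadBin_getElem k w j hj hlen2]
    have hzl : (List.zipWith pvCell (pvDig k a) (pvDig k b)).length = k := by
      simp [pvDig_length]
    rw [List.getElem_zipWith,
        pvDigElem k a _ (by simp [pvDig_length]; omega) (by simp [pvDig_length]; omega),
        pvDigElem k b _ (by simp [pvDig_length]; omega) (by simp [pvDig_length]; omega)]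
    simp only [hzl]
    rw [hbits _ hi, Int.testBit_lor]
    cases ha : a.testBit (k - 1 - j) <;> cases hb : b.testBit (k - 1 - j) <;>
      simp [pvCell, pvTrans]

-- pyRange 0 n 1 is empty for n ≤ 0
theorem pvPyRange_nil (n : Int) (hn : n ≤ 0) : PySem.List.pyRange 0 n 1 = [] := by
  apply List.eq_nil_iff_forall_not_mem.mpr
  intro x hx
  have := PySem.List.mem_pyRange_one.mp hx
  omega

theorem solution_spec : Claim_equal_solution := by
  unfold Claim_equal_solution
  intro n arr1 arr2 _ hpre
  unfold Spec_solution solution solution_alt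
  by_cases hn : n ≤ 0
  · simp only [pvPyRange_nil n hn, List.map_nil, if_pos hn]
  · push_neg at hn
    obtain ⟨hl1, hl2⟩ := hpre hn
    rw [if_neg (by omega)]
    have hncast : ((n.toNat : Int)) = n := Int.toNat_of_nonneg (by omega)
    have hs1 : PySem.List.slice arr1 none (some n) = arr1.take n.toNat := by
      rw [← hncast, PySem.List.slice_to_natCast]; congr 1
    have hs2 : PySem.List.slice arr2 none (some n) = arr2.take n.toNat := by
      rw [← hncast, PySem.List.slice_to_natCast]; congr 1
    rw [hs1, hs2]
    have ht1 : (arr1.take n.toNat).length = n.toNat := by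
      rw [List.length_take]; omega
    have ht2 : (arr2.take n.toNat).length = n.toNat := by
      rw [List.length_take]; omega
    apply List.ext_getElem
    · simp [PySem.List.length_pyRange_one, ht1, ht2]
    · intro i hA hB
      have hi : i < n.toNat := by
        simpa [PySem.List.length_pyRange_one] using hA
      have hk1 : i < arr1.length := by omega
      have hk2 : i < arr2.length := by omega
      rw [List.getElem_map, PySem.List.getElem_pyRange_one, List.getElem_map]
      have hz : (0 : Int) + (i : Int) = ((i : Nat) : Int) := by omega
      rw [hz]
      -- A's row i reduces to the zipped digit rows of arr1[i], arr2[i]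
      have hb1 : PySem.List.pyGetD (pvMakeBinary n arr1) (i : Int) []
          = (pvDigitsA n.toNat arr1[i] []).reverse := by
        rw [PySem.List.pyGetD_natCast]
        unfold pvMakeBinary
        rw [List.getD_eq_getElem _ _ (by simpa using hk1), List.getElem_map]
      have hb2 : PySem.List.pyGetD (pvMakeBinary n arr2) (i : Int) []
          = (pvDigitsA n.toNat arr2[i] []).reverse := by
        rw [PySem.List.pyGetD_natCast]
        unfold pvMakeBinary
        rw [List.getD_eq_getElem _ _ (by simpa using hk2), List.getElem_map]
      rw [hb1, hb2, pvDigitsA_eq, pvDigitsA_eq]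
      simp only [List.nil_append]
      -- B's row i is built from the same two array elements
      simp only [List.getElem_zip, List.getElem_take]
      refine congrArg String.ofList ((pvRow_eq n arr1[i] arr2[i]).trans ?_)
      have h := pvRowMain n.toNat arr1[i] arr2[i] (by omega)
      rw [hncast] at h
      exact h
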